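-- pv_equiv track=rewrite | github.com/software-competence-center-hagenberg/DSL-Code-Completion | pythia/tti_dataset.py | create_type_mapping
-- ===== SOURCE A (Python) =====
-- def create_type_mapping(vocab):
--     type2idx = {}
--     idx2type = {}
--
--     for i, w in enumerate(vocab):
--         t = w.split(':')
--         if len(t) > 1:
--             type = t[1]
--             idx2type[i] = type
--
--             if type in type2idx:
--                 type2idx[type].append(i)
--             else:
--                 type2idx[type] = [i]
--         else:
--             idx2type[i] = None
--
--     return type2idx, idx2type
-- ===== SOURCE B (Python) =====
-- def _token_type(w):
--     t = w.split(':')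
--     return t[1] if len(t) > 1 else None
--
--
-- def create_type_mapping(vocab):
--     # stage 1: materialize the per-token type column
--     types = [_token_type(w) for w in vocab]
--     idx2type = dict(enumerate(types))
--     # stage 2: distinct types in order of first occurrence
--     seen = []
--     for tp in types:
--         if tp is not None and tp not in seen:
--             seen.append(tp)
--     # stage 3: one scan of the column per distinct type (group-by-scan)
--     type2idx = {tp: [i for i, t in enumerate(types) if t == tp] for tp in seen}
--     return type2idx, idx2type
-- ===== Notes on version B (the rewrite author's own statement) =====
-- stated objective: alternative
-- what changed: B replaces A's single combined loop with a staged group-by-scan: it materializes the per-token type column, collects the distinct types in first-occurrence order, and then builds each type's index list by a separate scan of the column, instead of accumulating both dictionaries incrementally in one pass.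
import Mathlib
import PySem

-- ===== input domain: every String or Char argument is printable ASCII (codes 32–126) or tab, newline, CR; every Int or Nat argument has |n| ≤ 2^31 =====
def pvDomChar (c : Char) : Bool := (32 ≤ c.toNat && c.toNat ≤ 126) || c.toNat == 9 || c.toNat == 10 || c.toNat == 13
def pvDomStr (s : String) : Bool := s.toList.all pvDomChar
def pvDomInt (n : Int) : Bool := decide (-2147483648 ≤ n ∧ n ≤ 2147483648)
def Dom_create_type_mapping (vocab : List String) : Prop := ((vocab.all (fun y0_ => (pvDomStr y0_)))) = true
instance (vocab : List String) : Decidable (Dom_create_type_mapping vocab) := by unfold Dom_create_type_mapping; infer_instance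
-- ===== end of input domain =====

-- B stages the work differently (type column, then distinct types, then one scan per type); the return value is proved identical.

-- ===== PORT A =====
-- A: one combined loop maintaining both dictionaries at once
def ctmStepA (st : PySem.Dict String (List Int) × PySem.Dict Int (Option String))
    (p : Int × String) : PySem.Dict String (List Int) × PySem.Dict Int (Option String) :=
  let t := (PySem.Str.split? p.2 ":").getD []
  if t.length > 1 then
    let ty := t.getD 1 ""
    let i2t := st.2.insert p.1 (some ty)
    let t2i := match st.1.get? ty with
      | some l => st.1.insert ty (l ++ [p.1])
      | none => st.1.insert ty [p.1]
    (t2i, i2t)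
  else
    (st.1, st.2.insert p.1 none)

def create_type_mapping (vocab : List String) :
    (List (String × List Int)) × (List (Int × Option String)) :=
  let st := (PySem.List.enumerate vocab).foldl ctmStepA (PySem.Dict.empty, PySem.Dict.empty)
  (st.1.items, st.2.items)

-- ===== PORT B =====
def ctmTokenType (w : String) : Option String :=
  let t := (PySem.Str.split? w ":").getD []
  if t.length > 1 then some (t.getD 1 "") else none

def create_type_mapping_alt (vocab : List String) :
    (List (String × List Int)) × (List (Int × Option String)) :=
  -- stage 1: the per-token type column
  let types := vocab.map ctmTokenType
  let i2t := (PySem.List.enumerate types).foldl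
      (fun d p => d.insert p.1 p.2) (PySem.Dict.empty : PySem.Dict Int (Option String))
  -- stage 2: distinct types in order of first occurrence
  let seen := types.foldl
      (fun s tp => match tp with
        | some t => if t ∈ s then s else s ++ [t]
        | none => s) ([] : List String)
  -- stage 3: one scan of the column per distinct type
  let t2i := seen.foldl
      (fun d tp => d.insert tp
        (((PySem.List.enumerate types).filter (fun p => p.2 == some tp)).map (·.1)))
      (PySem.Dict.empty : PySem.Dict String (List Int))
  (t2i.items, i2t.items)

-- ===== PRECONDITION & SPEC =====
def Spec_create_type_mapping (vocab : List String) (out : (List (String × List Int)) × (List (Int × Option String))) : Prop := out = create_type_mapping_alt vocab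
instance (vocab : List String) (out : (List (String × List Int)) × (List (Int × Option String))) : Decidable (Spec_create_type_mapping vocab out) := by unfold Spec_create_type_mapping; infer_instance

-- ===== CLAIM (what is proved, stated in full; the proofs are below) =====
def Claim_equal_create_type_mapping : Prop := ∀ (vocab : List String), Dom_create_type_mapping vocab → Spec_create_type_mapping vocab (create_type_mapping vocab)

-- ===== LEMMAS AND PROOFS =====

-- enumerate commutes with map
theorem ctm_enumerate_map {α β : Type} (f : α → β) (xs : List α) (s : Int) :
    PySem.List.enumerate (xs.map f) s = (PySem.List.enumerate xs s).map (fun p => (p.1, f p.2)) := by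
  induction xs generalizing s with
  | nil => rfl
  | cons x xs ih => simp [PySem.List.enumerate_cons, ih]

-- the second components of A's combined fold equal a plain insert fold
theorem ctm_snd (L : List (Int × String)) (d2 : PySem.Dict String (List Int))
    (d1 : PySem.Dict Int (Option String)) :
    (L.foldl ctmStepA (d2, d1)).2 =
      L.foldl (fun d p => d.insert p.1 (ctmTokenType p.2)) d1 := by
  induction L generalizing d2 d1 with
  | nil => rfl
  | cons p L ih =>
    simp only [List.foldl_cons]
    rw [show (ctmStepA (d2, d1) p) =
      ((ctmStepA (d2, d1) p).1, d1.insert p.1 (ctmTokenType p.2)) from ?_]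
    · exact ih _ _
    · simp only [ctmStepA, ctmTokenType]
      split <;> simp

-- A's per-element update of type2idx, as a standalone step
def ctmStepA1 (d : PySem.Dict String (List Int)) (p : Int × String) :
    PySem.Dict String (List Int) :=
  let t := (PySem.Str.split? p.2 ":").getD []
  if t.length > 1 then
    let ty := t.getD 1 ""
    match d.get? ty with
    | some l => d.insert ty (l ++ [p.1])
    | none => d.insert ty [p.1]
  else d

theorem ctm_fst (L : List (Int × String)) (d2 : PySem.Dict String (List Int))
    (d1 : PySem.Dict Int (Option String)) :
    (L.foldl ctmStepA (d2, d1)).1 = L.foldl ctmStepA1 d2 := by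
  induction L generalizing d2 d1 with
  | nil => rfl
  | cons p L ih =>
    simp only [List.foldl_cons]
    rw [show (ctmStepA (d2, d1) p) =
      (ctmStepA1 d2 p, (ctmStepA (d2, d1) p).2) from ?_]
    · exact ih _ _
    · simp only [ctmStepA, ctmStepA1]
      split <;> simp

-- the grouping step on the "typed" pairs (i, token type)
def ctmGroup (d : PySem.Dict String (List Int)) (p : Int × Option String) :
    PySem.Dict String (List Int) :=
  match p.2 with
  | some ty => d.insert ty (d.getD ty [] ++ [p.1])
  | none => d

theorem ctm_step_eq (d : PySem.Dict String (List Int)) (p : Int × String) :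
    ctmStepA1 d p = ctmGroup d (p.1, ctmTokenType p.2) := by
  simp only [ctmStepA1, ctmGroup, ctmTokenType]
  split
  · split <;> rename_i h <;>
      · simp only [List.getD_eq_getElem?_getD] at h
        simp [PySem.Dict.getD_eq_get?_getD, h]
  · rfl

theorem ctm_fold_eq (L : List (Int × String)) (d : PySem.Dict String (List Int)) :
    L.foldl ctmStepA1 d = (L.map (fun p => (p.1, ctmTokenType p.2))).foldl ctmGroup d := by
  induction L generalizing d with
  | nil => rfl
  | cons p L ih => simp [ctm_step_eq, ih]

-- characterization of the grouping fold from empty: items are the distinct types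
-- in first-occurrence order, each paired with all its indices in order
theorem ctm_grp_items (L : List (Int × Option String)) :
    (L.foldl ctmGroup PySem.Dict.empty).items =
      (PySem.Set.ofList (L.filterMap (·.2))).map
        (fun tp => (tp, (L.filter (fun p => p.2 == some tp)).map (·.1))) := by
  induction L using List.reverseRecOn with
  | nil => rfl
  | append_singleton L p ih =>
    obtain ⟨i, o⟩ := p
    have hnd : (PySem.Set.ofList (L.filterMap (·.2))).Nodup := PySem.Set.nodup_ofList _
    have hkeys : (L.foldl ctmGroup PySem.Dict.empty).keys
        = PySem.Set.ofList (L.filterMap (·.2)) := by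
      simp only [PySem.Dict.keys, ih, List.map_map, Function.comp_def]
      simp
    have hknd : (L.foldl ctmGroup PySem.Dict.empty).keys.Nodup := by rw [hkeys]; exact hnd
    cases o with
    | none =>
      simp [ctmGroup, ih, List.filter_append, List.filterMap_append]
    | some ty =>
      simp only [List.foldl_append, List.foldl_cons, List.foldl_nil, ctmGroup]
      by_cases hmem : ty ∈ PySem.Set.ofList (L.filterMap (·.2))
      · have hget : (L.foldl ctmGroup PySem.Dict.empty).getD ty []
            = (L.filter (fun p => p.2 == some ty)).map (·.1) := by
          exact PySem.Dict.getD_of_mem_items _ (by rw [ih]; exact List.mem_map_of_mem hmem) hknd []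
        have hcont : (L.foldl ctmGroup PySem.Dict.empty).contains ty = true := by
          rw [PySem.Dict.contains_iff_mem_keys, hkeys]; exact hmem
        rw [PySem.Dict.items_insert_of_contains _ _ hcont, ih, List.map_map]
        have hset : PySem.Set.ofList ((L ++ [(i, some ty)]).filterMap (·.2))
            = PySem.Set.ofList (L.filterMap (·.2)) := by
          simp only [List.filterMap_append, List.filterMap_cons, List.filterMap_nil]
          rw [PySem.Set.ofList_append_singleton, PySem.Set.add_of_mem hmem]
        rw [hset]
        apply List.map_congr_left
        intro tp htp
        by_cases hty : tp = ty
        · subst hty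
          simp only [Function.comp_apply, beq_self_eq_true, if_pos]
          rw [hget]
          simp [List.filter_append]
        · have h1 : (tp == ty) = false := by simp [hty]
          have h2 : (some ty == some tp) = false := by simp [Ne.symm hty]
          simp [Function.comp_apply, List.filter_append, h2, hty]
      · have hcont : (L.foldl ctmGroup PySem.Dict.empty).contains ty = false := by
          rw [Bool.eq_false_iff]
          intro h
          exact hmem (hkeys ▸ (PySem.Dict.contains_iff_mem_keys _ _).mp h)
        have hget : (L.foldl ctmGroup PySem.Dict.empty).getD ty [] = [] :=
          PySem.Dict.getD_of_not_contains _ _ hcont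
        have hfil : L.filter (fun p => p.2 == some ty) = [] := by
          rw [List.filter_eq_nil_iff]
          intro q hq hbq
          apply hmem
          rw [PySem.Set.mem_ofList]
          exact List.mem_filterMap.mpr ⟨q, hq, by simpa using hbq⟩
        rw [PySem.Dict.items_insert_of_not_contains _ _ hcont, ih, hget]
        have hset : PySem.Set.ofList ((L ++ [(i, some ty)]).filterMap (·.2))
            = PySem.Set.ofList (L.filterMap (·.2)) ++ [ty] := by
          simp only [List.filterMap_append, List.filterMap_cons, List.filterMap_nil]
          rw [PySem.Set.ofList_append_singleton, PySem.Set.add_of_not_mem hmem]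
        rw [hset, List.map_append]
        congr 1
        · apply List.map_congr_left
          intro tp htp
          have h2 : (some ty == some tp) = false := by
            simp; rintro rfl; exact hmem htp
          simp [List.filter_append, h2]
        · simp [List.filter_append, hfil]

-- B's "seen" fold is Set.ofList of the non-None types
theorem ctm_seen (os : List (Option String)) (s : List String) :
    os.foldl (fun s tp => match tp with
        | some t => if t ∈ s then s else s ++ [t]
        | none => s) s = PySem.Set.update s (os.filterMap id) := by
  induction os generalizing s with
  | nil => simp [PySem.Set.update]
  | cons o os ih =>
    cases o with
    | none => simpa using ih s
    | some t =>
      show _ = PySem.Set.update s (t :: os.filterMap id)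
      rw [PySem.Set.update_cons, ← ih]
      simp only [List.foldl_cons]
      rw [PySem.Set.add_eq_ite]

-- ===== VERDICT (by name: the statement is the Claim_ definition above) =====
theorem create_type_mapping_spec : Claim_equal_create_type_mapping := by
  intro vocab _
  unfold Spec_create_type_mapping
  simp only [create_type_mapping, create_type_mapping_alt]
  rw [ctm_fst, ctm_snd, ctm_fold_eq, ctm_grp_items, ctm_seen, ctm_enumerate_map]
  rw [PySem.Set.update_nil_left]
  have hfm : List.filterMap id (vocab.map ctmTokenType)
      = ((PySem.List.enumerate vocab).map (fun p => (p.1, ctmTokenType p.2))).filterMap (·.2) := by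
    simp only [List.filterMap_map]
    conv_lhs => rw [← PySem.List.map_snd_enumerate vocab 0, List.filterMap_map]
    rfl
  rw [hfm, Prod.mk.injEq]
  constructor
  · have := PySem.Dict.items_foldl_insert_fresh
      (l := PySem.Set.ofList (((PySem.List.enumerate vocab).map (fun p => (p.1, ctmTokenType p.2))).filterMap (·.2)))
      (k := fun tp => tp)
      (v := fun tp => (((PySem.List.enumerate vocab).map (fun p => (p.1, ctmTokenType p.2))).filter
        (fun p => p.2 == some tp)).map (·.1))
      (d := PySem.Dict.empty)
      (by intro a _; simp [PySem.Dict.contains_empty])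
      (by simp)
    simpa using this.symm
  · rw [List.foldl_map]
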